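-- pv_equiv track=rewrite | github.com/felix-holmes/yelp | yelp.py | findCategories
-- ===== SOURCE A (Python) =====
-- def findCategories(yelpDict, threshold):
--     """
--     Finds all categories in a Yelp dictionary at or above a given threshold.
--     """
--     counts = {}
--     above = {}
--     for business in yelpDict.values():
--         for category in business['categories']:
--             if category in counts:
--                 counts[category] += 1
--             else:
--                 counts[category] = 1
--     for category, count in counts.items():
--         if count >= threshold:
--             above[category] = count
--     return above
-- ===== SOURCE B (Python) =====
-- def findCategories(yelpDict, threshold):
--     """
--     Finds all categories in a Yelp dictionary at or above a given threshold.
--     Alternative algorithm: flatten all categories, sort them, count equal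
--     consecutive runs in the sorted list (no hash-based counter), then emit
--     the qualifying categories in first-occurrence order.
--     """
--     cats = []
--     for business in yelpDict.values():
--         cats.extend(business['categories'])
--     counts = {}
--     prev = None
--     n = 0
--     for c in sorted(cats):
--         if c == prev:
--             n += 1
--         else:
--             if prev is not None:
--                 counts[prev] = n
--             prev, n = c, 1
--     if prev is not None:
--         counts[prev] = n
--     return {c: counts[c] for c in dict.fromkeys(cats) if counts[c] >= threshold}
-- ===== Notes on version B (the rewrite author's own statement) =====
-- stated objective: alternative
-- what changed: B flattens all categories into one list, sorts it and counts equal consecutive runs with a prev/run-length state machine (no hash-based counter), then assembles the result with a dict comprehension over the first occurrences, instead of A's incremental counter dict plus a second filtering pass over its items.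
import Mathlib
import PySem

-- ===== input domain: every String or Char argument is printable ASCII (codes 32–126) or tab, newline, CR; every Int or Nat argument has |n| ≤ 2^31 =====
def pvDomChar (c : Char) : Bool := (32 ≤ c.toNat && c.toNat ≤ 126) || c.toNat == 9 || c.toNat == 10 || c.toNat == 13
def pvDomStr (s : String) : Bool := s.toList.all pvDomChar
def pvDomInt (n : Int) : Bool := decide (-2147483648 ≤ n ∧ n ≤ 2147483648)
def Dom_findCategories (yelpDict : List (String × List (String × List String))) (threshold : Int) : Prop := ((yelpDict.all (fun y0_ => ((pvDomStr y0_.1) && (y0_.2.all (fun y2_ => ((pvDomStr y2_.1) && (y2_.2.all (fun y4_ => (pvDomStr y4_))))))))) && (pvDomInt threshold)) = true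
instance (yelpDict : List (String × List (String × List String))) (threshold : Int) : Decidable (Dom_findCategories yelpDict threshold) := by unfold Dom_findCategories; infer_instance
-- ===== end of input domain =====

-- B replaces A's hash-counter accumulation by sorting the flattened category list and counting
-- equal consecutive runs, emitting the result in first-occurrence order — objective: alternative.

-- ===== PORT A =====
-- business['categories'] raises KeyError when absent; Pre_ restricts to inputs where the key
-- is present, so getD "categories" [] is exact there.
def findCategories (yelpDict : List (String × List (String × List String))) (threshold : Int) : List (String × Int) :=
  let counts : PySem.Dict String Int :=
    ((PySem.Dict.ofList yelpDict).values).foldl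
      (fun counts business =>
        ((PySem.Dict.ofList business).getD "categories" []).foldl
          (fun counts category =>
            if counts.contains category then counts.insert category (counts.getD category 0 + 1)
            else counts.insert category 1)
          counts)
      PySem.Dict.empty
  let above : PySem.Dict String Int :=
    counts.items.foldl
      (fun above p => if p.2 ≥ threshold then above.insert p.1 p.2 else above)
      PySem.Dict.empty
  above.items

-- ===== PORT B =====
-- one iteration of B's run-counting loop over the sorted list; state = (counts, prev, n)
def runStep (st : PySem.Dict String Int × Option String × Int) (c : String) :
    PySem.Dict String Int × Option String × Int :=
  if st.2.1 = some c then (st.1, st.2.1, st.2.2 + 1)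
  else
    match st.2.1 with
    | some r => (st.1.insert r st.2.2, some c, 1)
    | none => (st.1, some c, 1)

-- B's final flush: 'if prev is not None: counts[prev] = n'
def runFlush (st : PySem.Dict String Int × Option String × Int) : PySem.Dict String Int :=
  match st.2.1 with
  | some r => st.1.insert r st.2.2
  | none => st.1

def findCategories_alt (yelpDict : List (String × List (String × List String))) (threshold : Int) : List (String × Int) :=
  let cats : List String :=
    ((PySem.Dict.ofList yelpDict).values).foldl
      (fun acc business => acc ++ (PySem.Dict.ofList business).getD "categories" []) []
  let counts : PySem.Dict String Int :=
    runFlush ((PySem.List.sorted cats (fun x => x) false).foldl runStep (PySem.Dict.empty, none, 0))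
  -- dict comprehension over dict.fromkeys(cats); counts[c] is exact as getD since every
  -- c ∈ cats is a key of counts (otherwise Python's counts[c] would raise, which it never does here)
  ((PySem.List.dedup cats).foldl
    (fun (above : PySem.Dict String Int) c =>
      if counts.getD c 0 ≥ threshold then above.insert c (counts.getD c 0) else above)
    PySem.Dict.empty).items

-- ===== PRECONDITION & SPEC =====
-- Pre_ excludes exactly the inputs where some business dict lacks the key "categories":
-- there Python A (and B) raise KeyError.
def Pre_findCategories (yelpDict : List (String × List (String × List String))) (_threshold : Int) : Prop :=
  ∀ business ∈ (PySem.Dict.ofList yelpDict).values, (PySem.Dict.ofList business).contains "categories" = true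
instance (yelpDict : List (String × List (String × List String))) (threshold : Int) : Decidable (Pre_findCategories yelpDict threshold) := by unfold Pre_findCategories; infer_instance
def pvWitness_findCategories : (List (String × List (String × List String))) × Int :=
  ([("b1", [("categories", ["Food", "Bars", "Food"])]), ("b2", [("categories", ["Food"]), ("city", ["Reno"])])], 2)

def Spec_findCategories (yelpDict : List (String × List (String × List String))) (threshold : Int) (out : List (String × Int)) : Prop := out = findCategories_alt yelpDict threshold
instance (yelpDict : List (String × List (String × List String))) (threshold : Int) (out : List (String × Int)) : Decidable (Spec_findCategories yelpDict threshold out) := by unfold Spec_findCategories; infer_instance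

-- ===== CLAIM (what is proved, stated in full; the proofs are below) =====
def Claim_equal_findCategories : Prop := ∀ (yelpDict : List (String × List (String × List String))) (threshold : Int), Dom_findCategories yelpDict threshold → Pre_findCategories yelpDict threshold → Spec_findCategories yelpDict threshold (findCategories yelpDict threshold)

-- ===== LEMMAS AND PROOFS =====

-- A's branchy counting step is exactly the insert-with-default-0 step.
theorem countStep_eq :
    (fun (counts : PySem.Dict String Int) category =>
        if counts.contains category then counts.insert category (counts.getD category 0 + 1)
        else counts.insert category 1)
    = (fun counts category => counts.insert category (counts.getD category 0 + 1)) := by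
  funext counts category
  by_cases h : counts.contains category = true
  · simp [h]
  · simp only [Bool.not_eq_true] at h
    simp [h, PySem.Dict.getD_of_not_contains counts 0 h]

-- A's filter loop over a fresh-keyed items list appends the kept pairs.
theorem filterLoop_items (t : Int) :
    ∀ (l : List (String × Int)) (acc : List (String × Int)),
      (∀ p ∈ l, p.1 ∉ acc.map Prod.fst) → (l.map Prod.fst).Nodup →
      (l.foldl (fun (d : PySem.Dict String Int) p => if p.2 ≥ t then d.insert p.1 p.2 else d)
        (PySem.Dict.mk acc)).items
      = acc ++ l.filter (fun p => p.2 ≥ t) := by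
  intro l
  induction l with
  | nil => intro acc _ _; simp
  | cons p l ih =>
    intro acc hfresh hnd
    have hp : p.1 ∉ acc.map Prod.fst := hfresh p (by simp)
    have hcon : (PySem.Dict.mk acc).contains p.1 = false := by
      rw [PySem.Dict.contains_mk]
      simp only [List.any_eq_false]
      intro q hq hq1
      exact hp (List.mem_map.mpr ⟨q, hq, eq_of_beq hq1⟩)
    have hfresh' : ∀ q ∈ l, q.1 ∉ (acc ++ [p]).map Prod.fst := by
      intro q hq
      simp only [List.map_append, List.mem_append, List.map_cons, List.map_nil]
      rintro (h | h)
      · exact hfresh q (by simp [hq]) h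
      · simp at h
        simp only [List.map_cons, List.nodup_cons] at hnd
        exact hnd.1 (h ▸ List.mem_map.mpr ⟨q, hq, rfl⟩)
    by_cases hge : p.2 ≥ t
    · have hins : (PySem.Dict.mk acc).insert p.1 p.2 = PySem.Dict.mk (acc ++ [p]) := by
        apply PySem.Dict.ext
        rw [PySem.Dict.items_insert_of_not_contains _ p.2 hcon]
      simp only [List.foldl_cons]
      rw [if_pos hge, hins, ih (acc ++ [p]) hfresh' (by simp at hnd; exact hnd.2)]
      simp [hge]
    · simp only [List.foldl_cons]
      rw [if_neg hge, ih acc (fun q hq => hfresh q (by simp [hq])) (by simp at hnd; exact hnd.2)]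
      simp [hge]

-- B's run-counting loop over a sorted suffix l after a current run (r, n):
-- the flushed table looks up to exact multiplicities.
theorem runLoop_getD :
    ∀ (l : List String) (d : PySem.Dict String Int) (r : String) (n : Int) (c : String),
      (r :: l).Pairwise (· ≤ ·) →
      (runFlush (l.foldl runStep (d, some r, n))).getD c 0
        = if c = r then n + l.count r
          else if c ∈ l then (l.count c : Int) else d.getD c 0 := by
  intro l
  induction l with
  | nil =>
    intro d r n c _
    by_cases h : c = r <;> simp [runFlush, h, PySem.Dict.getD_insert]
  | cons c' l ih =>
    intro d r n c hpw
    have hpw' : (c' :: l).Pairwise (· ≤ ·) := hpw.of_cons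
    have hrc' : r ≤ c' := (List.pairwise_cons.mp hpw).1 c' (by simp)
    by_cases hcr : c' = r
    · -- same run continues
      subst hcr
      have hpw2 : (c' :: l).Pairwise (· ≤ ·) := hpw'
      simp only [List.foldl_cons, runStep, if_true]
      rw [ih d c' (n + 1) c hpw2]
      by_cases h : c = c'
      · subst h; simp; ring
      · have h' : ¬ c' = c := fun hh => h hh.symm
        simp [h, h', List.mem_cons]
    · -- run switches: r < c' and r ∉ l
      have hrl : r ∉ l := by
        intro hmem
        have hc'x : c' ≤ r := (List.pairwise_cons.mp hpw').1 r hmem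
        exact hcr (le_antisymm hc'x hrc')
      have hne : ¬ (some r = some c') := by simpa using fun h => hcr h.symm
      simp only [List.foldl_cons, runStep, if_neg hne]
      rw [ih (d.insert r n) c' 1 c hpw']
      by_cases h : c = r
      · subst h
        have hcc' : c ≠ c' := fun h => hcr h.symm
        simp [hcc', hrl, List.count_eq_zero.mpr hrl, hcr]
      · by_cases h2 : c = c'
        · subst h2; simp [h]; ring
        · by_cases h3 : c ∈ l
          · have h2' : c' ≠ c := fun hh => h2 hh.symm
            simp [h, h2, h2', h3]
          · simp [h, h2, h3, List.mem_cons, PySem.Dict.getD_insert]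

-- the whole of B's counting phase looks up to list multiplicities
theorem counts_getD (cats : List String) (c : String) (hc : c ∈ cats) :
    (runFlush ((PySem.List.sorted cats (fun x => x) false).foldl runStep
        (PySem.Dict.empty, none, 0))).getD c 0 = (cats.count c : Int) := by
  rcases hs : PySem.List.sorted cats (fun x => x) false with _ | ⟨r, l⟩
  · exact absurd ((PySem.List.sorted_eq_nil_iff cats (fun x => x) false).mp hs ▸ hc) (fun hh => (List.not_mem_nil hh))
  · have hpw : (r :: l).Pairwise (· ≤ ·) := by
      have := PySem.List.sorted_pairwise cats (fun x => x) (κ := String)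
      rw [hs] at this; exact this
    have hperm : (r :: l).Perm cats := hs ▸ PySem.List.sorted_perm cats (fun x => x) false
    have hmem : c ∈ r :: l := hperm.mem_iff.mpr hc
    have hcount : (r :: l).count c = cats.count c := hperm.count_eq c
    have hstep0 : runStep (PySem.Dict.empty, none, 0) r = (PySem.Dict.empty, some r, 1) := by
      simp [runStep]
    rw [List.foldl_cons, hstep0, runLoop_getD l PySem.Dict.empty r 1 c hpw]
    by_cases h : c = r
    · subst h
      rw [← hcount]; simp; ring
    · have hl : c ∈ l := by rcases List.mem_cons.mp hmem with h' | h'; exact absurd h' h; exact h'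
      have h' : ¬ r = c := fun hh => h hh.symm
      rw [← hcount]; simp [h, h', hl]

-- ===== VERDICT (by name: the statement is the Claim_ definition above) =====
theorem findCategories_spec : Claim_equal_findCategories := by
  intro yelpDict threshold _ _
  unfold Spec_findCategories findCategories findCategories_alt
  simp only []
  rw [PySem.List.foldl_append_eq_flatMap]
  simp only [List.nil_append]
  set cats : List String :=
    ((PySem.Dict.ofList yelpDict).values).flatMap
      (fun business => (PySem.Dict.ofList business).getD "categories" []) with hcats
  -- A's counting loops compute counter cats
  have hcount :
      ((PySem.Dict.ofList yelpDict).values).foldl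
        (fun counts business =>
          ((PySem.Dict.ofList business).getD "categories" []).foldl
            (fun counts category =>
              if counts.contains category then counts.insert category (counts.getD category 0 + 1)
              else counts.insert category 1)
            counts)
        PySem.Dict.empty
      = PySem.Dict.counter cats := by
    rw [countStep_eq, hcats, ← List.foldl_flatMap]
    exact PySem.Dict.foldl_insert_getD_add_one_eq_counter cats
  rw [hcount]
  -- A's filter loop over the counter's items
  have hA :
      ((PySem.Dict.counter cats).items.foldl
        (fun (d : PySem.Dict String Int) p => if p.2 ≥ threshold then d.insert p.1 p.2 else d)
        PySem.Dict.empty).items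
      = (PySem.Dict.counter cats).items.filter (fun p => p.2 ≥ threshold) := by
    have h := filterLoop_items threshold (PySem.Dict.counter cats).items [] (by simp)
      (PySem.Dict.nodup_keys_counter cats)
    simpa [PySem.Dict.empty] using h
  rw [hA, PySem.Dict.items_counter, List.filter_map]
  -- B's emission loop: fold over distinct first occurrences appends fresh keys
  set counts : PySem.Dict String Int :=
    runFlush ((PySem.List.sorted cats (fun x => x) false).foldl runStep
      (PySem.Dict.empty, none, 0)) with hcnts
  have hB :
      ((PySem.List.dedup cats).foldl
        (fun (above : PySem.Dict String Int) c =>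
          if counts.getD c 0 ≥ threshold then above.insert c (counts.getD c 0) else above)
        PySem.Dict.empty).items
      = ((PySem.List.dedup cats).filter (fun c => counts.getD c 0 ≥ threshold)).map
          (fun c => (c, counts.getD c 0)) := by
    rw [PySem.List.foldl_ite_eq_foldl_filter]
    rw [PySem.Dict.items_foldl_insert_fresh _ _ _ _ (by intro a _; simp)
      (by simpa using (List.Nodup.filter _ (PySem.List.nodup_dedup cats)))]
    simp [PySem.Dict.empty]
  rw [hB]
  -- both sides: map over the same filtered first-occurrence list with equal values
  have hdd : PySem.List.dedup cats = PySem.Set.ofList cats := PySem.List.dedup_eq_ofList cats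
  rw [hdd]
  have hval : ∀ c ∈ PySem.Set.ofList cats, counts.getD c 0 = (cats.count c : Int) := by
    intro c hcmem
    exact counts_getD cats c ((PySem.Set.mem_ofList cats c).mp hcmem)
  have hBside :
      ((PySem.Set.ofList cats).filter (fun c => decide (counts.getD c 0 ≥ threshold))).map
        (fun c => (c, counts.getD c 0))
      = ((PySem.Set.ofList cats).filter (fun c => decide ((cats.count c : Int) ≥ threshold))).map
        (fun c => (c, (cats.count c : Int))) := by
    rw [List.filter_congr (fun c hc => by rw [hval c hc])]
    apply List.map_congr_left
    intro c hc
    rw [hval c (List.mem_of_mem_filter hc)]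
  rw [hBside]
  simp only [Function.comp_def]
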